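-- pv_equiv track=rewrite | github.com/EugeneleconteSIFA/MySifa | app/routers/fabrication.py | _compute_etat
-- ===== SOURCE A (Python) =====
-- def _compute_etat(saisies: list) -> str:
--     """Calcule l'état machine à partir des saisies du jour (du plus récent au plus vieux)."""
--     if not saisies:
--         return "sans_session"
--
--     last = saisies[-1]
--     code = str(last.get("operation_code") or "").strip()
--
--     if code == "90":  # Annulation saisie : on ignore et on regarde avant
--         return _compute_etat(saisies[:-1])
--     if code == "87":  # Départ personnel
--         return "sans_session"
--     if code == "86":  # Arrivée personnel
--         return "arrive"
--     if code in ("01",):  # Début dossier → production en cours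
--         return "en_cours_production"
--     if code in ("03", "88"):  # Production / Reprise
--         return "en_cours_production"
--     if code == "89":  # Fin dossier
--         return "fin_dossier"
--
--     # Codes 50–85 → arrêt machine
--     try:
--         if 50 <= int(code) <= 85:
--             return "en_arret"
--     except (ValueError, TypeError):
--         pass
--
--     return "en_cours_production"
-- ===== SOURCE B (Python) =====
-- def _compute_etat(saisies: list) -> str:
--     """Filter-then-table-lookup: keep entries whose code is not '90', classify the last one."""
--     def _code(entry):
--         return str(entry.get("operation_code") or "").strip()
--
--     effective = [s for s in saisies if _code(s) != "90"]
--     if not effective: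
--         return "sans_session"
--
--     code = _code(effective[-1])
--     table = {
--         "87": "sans_session",
--         "86": "arrive",
--         "01": "en_cours_production",
--         "03": "en_cours_production",
--         "88": "en_cours_production",
--         "89": "fin_dossier",
--     }
--     if code in table:
--         return table[code]
--     try:
--         if 50 <= int(code) <= 85:
--             return "en_arret"
--     except (ValueError, TypeError):
--         pass
--     return "en_cours_production"
-- ===== Notes on version B (the rewrite author's own statement) =====
-- stated objective: simpler
-- what changed: Replaces the recursive trailing-'90' peel and if-chain with a single filter that drops all '90' entries plus a dict table lookup on the last remaining entry's code.
import Mathlib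
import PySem

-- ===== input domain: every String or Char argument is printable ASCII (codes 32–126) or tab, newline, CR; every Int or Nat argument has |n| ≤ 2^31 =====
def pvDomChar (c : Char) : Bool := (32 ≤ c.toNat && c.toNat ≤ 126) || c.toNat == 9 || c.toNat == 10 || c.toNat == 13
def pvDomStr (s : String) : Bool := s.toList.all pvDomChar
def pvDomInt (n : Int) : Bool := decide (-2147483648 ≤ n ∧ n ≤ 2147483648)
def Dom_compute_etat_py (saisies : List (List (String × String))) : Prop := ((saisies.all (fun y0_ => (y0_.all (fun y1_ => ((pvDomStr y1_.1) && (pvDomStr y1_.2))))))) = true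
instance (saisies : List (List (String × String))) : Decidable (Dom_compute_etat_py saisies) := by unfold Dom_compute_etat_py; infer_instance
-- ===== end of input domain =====

-- B is simpler: one filter pass dropping the '90' (cancelled) entries plus a table lookup on the
-- last remaining entry, instead of A's recursive trailing peel with an if-chain.

-- shared helper: code = str(entry.get("operation_code") or "").strip()  (both Pythons compute this expression)
def pvCode (entry : List (String × String)) : String :=
  PySem.Str.strip ((((entry.find? (fun kv => kv.1 == "operation_code")).map (·.2)).getD ""))

-- ===== PORT A =====
def compute_etat_py (saisies : List (List (String × String))) : String :=
  if h : saisies = [] then "sans_session"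
  else
    let code := pvCode (saisies.getLast h)   -- saisies[-1]
    if code = "90" then compute_etat_py (PySem.List.slice saisies none (some (-1)))  -- saisies[:-1]
    else if code = "87" then "sans_session"
    else if code = "86" then "arrive"
    else if code = "01" then "en_cours_production"
    else if code = "03" ∨ code = "88" then "en_cours_production"
    else if code = "89" then "fin_dossier"
    else
      match PySem.Int.ofStr? code with   -- int(code); ValueError → none
      | some n => if 50 ≤ n ∧ n ≤ 85 then "en_arret" else "en_cours_production"
      | none => "en_cours_production"
termination_by saisies.length
decreasing_by
  simp only [PySem.List.slice_to_neg_one, List.length_dropLast]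
  have := List.length_pos_of_ne_nil h
  omega

-- ===== PORT B =====
def pvTable : PySem.Dict String String :=
  PySem.Dict.ofList [("87", "sans_session"), ("86", "arrive"), ("01", "en_cours_production"),
                     ("03", "en_cours_production"), ("88", "en_cours_production"), ("89", "fin_dossier")]

def compute_etat_py_alt (saisies : List (List (String × String))) : String :=
  match (saisies.filter (fun s => pvCode s ≠ "90")).getLast? with
  | none => "sans_session"
  | some e =>
      match PySem.Dict.get? pvTable (pvCode e) with
      | some etat => etat
      | none =>
          match PySem.Int.ofStr? (pvCode e) with
          | some n => if 50 ≤ n ∧ n ≤ 85 then "en_arret" else "en_cours_production"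
          | none => "en_cours_production"

-- ===== PRECONDITION & SPEC =====
def Spec_compute_etat_py (saisies : List (List (String × String))) (out : String) : Prop := out = compute_etat_py_alt saisies
instance (saisies : List (List (String × String))) (out : String) : Decidable (Spec_compute_etat_py saisies out) := by unfold Spec_compute_etat_py; infer_instance

-- ===== CLAIM (what is proved, stated in full; the proofs are below) =====
def Claim_equal_compute_etat_py : Prop := ∀ (saisies : List (List (String × String))), Dom_compute_etat_py saisies → Spec_compute_etat_py saisies (compute_etat_py saisies)

-- ===== LEMMAS AND PROOFS =====

-- A's classification chain on a non-'90' code, extracted for the proof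
def pvClassA (code : String) : String :=
  if code = "87" then "sans_session"
  else if code = "86" then "arrive"
  else if code = "01" then "en_cours_production"
  else if code = "03" ∨ code = "88" then "en_cours_production"
  else if code = "89" then "fin_dossier"
  else
    match PySem.Int.ofStr? code with
    | some n => if 50 ≤ n ∧ n ≤ 85 then "en_arret" else "en_cours_production"
    | none => "en_cours_production"

-- B's classification of a code
def pvClassB (code : String) : String :=
  match PySem.Dict.get? pvTable code with
  | some etat => etat
  | none =>
      match PySem.Int.ofStr? code with
      | some n => if 50 ≤ n ∧ n ≤ 85 then "en_arret" else "en_cours_production"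
      | none => "en_cours_production"

theorem classAB (code : String) : pvClassA code = pvClassB code := by
  unfold pvClassA pvClassB
  have ht : pvTable = PySem.Dict.mk [("87", "sans_session"), ("86", "arrive"),
      ("01", "en_cours_production"), ("03", "en_cours_production"),
      ("88", "en_cours_production"), ("89", "fin_dossier")] := rfl
  rw [ht]
  simp only [PySem.Dict.get?_mk_cons, beq_iff_eq]
  by_cases h1 : code = "87"
  · simp [h1]
  by_cases h2 : code = "86"
  · simp [h2]
  by_cases h3 : code = "01"
  · simp [h3]
  by_cases h4 : code = "03"
  · simp [h4]
  by_cases h5 : code = "88"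
  · simp [h5]
  by_cases h6 : code = "89"
  · simp [h6]
  rw [if_neg h1, if_neg h2, if_neg h3, if_neg (by tauto : ¬(code = "03" ∨ code = "88")),
      if_neg h6, if_neg (fun hh => h1 hh.symm), if_neg (fun hh => h2 hh.symm),
      if_neg (fun hh => h3 hh.symm), if_neg (fun hh => h4 hh.symm),
      if_neg (fun hh => h5 hh.symm), if_neg (fun hh => h6 hh.symm)]
  have hn : (PySem.Dict.mk ([] : List (String × String))).get? code = none := rfl
  rw [hn]

theorem A_append (l : List (List (String × String))) (a : List (String × String)) :
    compute_etat_py (l ++ [a]) =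
      if pvCode a = "90" then compute_etat_py l else pvClassA (pvCode a) := by
  rw [compute_etat_py.eq_def]
  have hne : l ++ [a] ≠ [] := by simp
  rw [dif_neg hne]
  rw [show (l ++ [a]).getLast hne = a from by simp,
      PySem.List.slice_to_neg_one, List.dropLast_concat]
  rfl

theorem B_append (l : List (List (String × String))) (a : List (String × String)) :
    compute_etat_py_alt (l ++ [a]) =
      if pvCode a = "90" then compute_etat_py_alt l else pvClassB (pvCode a) := by
  unfold compute_etat_py_alt pvClassB
  rw [List.filter_append]
  by_cases h : pvCode a = "90"
  · have hf : List.filter (fun s => decide (pvCode s ≠ "90")) [a] = [] := by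
      simp [h]
    rw [hf, List.append_nil, if_pos h]
  · have hf : List.filter (fun s => decide (pvCode s ≠ "90")) [a] = [a] := by
      simp [h]
    rw [hf, if_neg h, List.getLast?_concat]

theorem AB_eq (saisies : List (List (String × String))) :
    compute_etat_py saisies = compute_etat_py_alt saisies := by
  induction saisies using List.reverseRecOn with
  | nil => rw [compute_etat_py]; rfl
  | append_singleton l a ih =>
      rw [A_append, B_append, classAB]
      by_cases h : pvCode a = "90" <;> simp [h, ih]

-- ===== VERDICT (by name: the statement is the Claim_ definition above) =====
theorem compute_etat_py_spec : Claim_equal_compute_etat_py := by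
  intro saisies _
  unfold Spec_compute_etat_py
  exact AB_eq saisies
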